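-- pv_equiv track=rewrite | github.com/TwonkyHardware/AOC-2024 | 09/part2.py | find_free_blocks
-- ===== SOURCE A (Python) =====
-- def find_free_blocks(num, block_map):
--     """
--     Find the indices of the first contiguous group of `num` free blocks in
--     `block_map[]`.
--     """
--
--     free_indices = []
--     for i,f in enumerate(block_map):
--         if f == '.':
--             free_indices.append(i)
--             if len(free_indices) == num:
--                 return free_indices
--         else:
--             free_indices = []
--
--     return []
-- ===== SOURCE B (Python) =====
-- def find_free_blocks(num, block_map):
--     """
--     Find the indices of the first contiguous group of `num` free blocks in
--     `block_map[]`.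
--     """
--     # Pass 1: build a table of maximal free runs as (start, length) spans.
--     spans = []
--     cur = None
--     for i, f in enumerate(block_map):
--         if f == '.':
--             cur = (i, 1) if cur is None else (cur[0], cur[1] + 1)
--         else:
--             if cur is not None:
--                 spans.append(cur)
--             cur = None
--     if cur is not None:
--         spans.append(cur)
--     # Pass 2: pick the first span wide enough and emit its first `num` indices.
--     for start, length in spans:
--         if length >= num:
--             return list(range(start, start + num))
--     return []
-- ===== Notes on version B (the rewrite author's own statement) =====
-- stated objective: alternative
-- what changed: Replaces the inline accumulate-and-early-return scan with two separate passes: first build a table of maximal free-run spans (start, length), then select the first span of sufficient length and emit list(range(start, start+num)).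
import Mathlib
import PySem

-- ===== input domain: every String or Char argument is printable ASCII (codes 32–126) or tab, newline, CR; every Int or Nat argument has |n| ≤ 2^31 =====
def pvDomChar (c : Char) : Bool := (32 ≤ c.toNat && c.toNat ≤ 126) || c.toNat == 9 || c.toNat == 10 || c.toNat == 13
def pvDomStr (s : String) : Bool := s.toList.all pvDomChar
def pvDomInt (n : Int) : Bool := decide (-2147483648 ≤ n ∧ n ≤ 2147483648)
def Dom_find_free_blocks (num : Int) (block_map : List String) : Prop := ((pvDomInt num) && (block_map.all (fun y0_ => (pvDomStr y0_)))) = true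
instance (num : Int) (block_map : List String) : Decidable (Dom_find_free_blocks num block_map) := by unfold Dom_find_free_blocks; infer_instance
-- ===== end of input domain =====

-- B replaces A's inline accumulate-and-early-return scan by two passes: build a
-- table of maximal free-run (start, length) spans, then select from that table.

-- ===== PORT A =====
-- the for-loop over enumerate(block_map) with early return, state = free_indices
def goA (num : Int) (l : List (Int × String)) (free : List Int) : List Int :=
  match l with
  | [] => []
  | (i, f) :: rest =>
    if f == "." then
      let free' := free ++ [i]
      if (free'.length : Int) = num then free' else goA num rest free'
    else goA num rest []

def find_free_blocks (num : Int) (block_map : List String) : List Int :=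
  goA num (PySem.List.enumerate block_map 0) []

-- ===== PORT B =====
-- pass 1 of Source B: collect maximal '.'-runs as (start, length) spans
def freeSpans (l : List String) (i : Int) (cur : Option (Int × Int)) (acc : List (Int × Int)) : List (Int × Int) :=
  match l with
  | [] => match cur with
          | some sp => acc ++ [sp]
          | none => acc
  | f :: rest =>
    if f == "." then
      match cur with
      | some (s, len) => freeSpans rest (i + 1) (some (s, len + 1)) acc
      | none => freeSpans rest (i + 1) (some (i, 1)) acc
    else
      match cur with
      | some sp => freeSpans rest (i + 1) none (acc ++ [sp])
      | none => freeSpans rest (i + 1) none acc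

-- pass 2 of Source B: first span wide enough, emit list(range(start, start+num))
def firstFit (num : Int) : List (Int × Int) → List Int
  | [] => []
  | (s, len) :: rest => if num ≤ len then PySem.List.pyRange s (s + num) 1 else firstFit num rest

def find_free_blocks_alt (num : Int) (block_map : List String) : List Int :=
  firstFit num (freeSpans block_map 0 none [])

-- ===== PRECONDITION & SPEC =====
def Spec_find_free_blocks (num : Int) (block_map : List String) (out : List Int) : Prop := out = find_free_blocks_alt num block_map
instance (num : Int) (block_map : List String) (out : List Int) : Decidable (Spec_find_free_blocks num block_map out) := by unfold Spec_find_free_blocks; infer_instance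

-- ===== CLAIM (what is proved, stated in full; the proofs are below) =====
def Claim_equal_find_free_blocks : Prop := ∀ (num : Int) (block_map : List String), Dom_find_free_blocks num block_map → Spec_find_free_blocks num block_map (find_free_blocks num block_map)

-- ===== LEMMAS AND PROOFS =====

-- acc is only ever extended on the right
lemma freeSpans_acc (l : List String) : ∀ (i : Int) (cur : Option (Int × Int)) (acc : List (Int × Int)),
    freeSpans l i cur acc = acc ++ freeSpans l i cur [] := by
  induction l with
  | nil => intro i cur acc; cases cur <;> simp [freeSpans]
  | cons f rest ih =>
    intro i cur acc
    by_cases hf : f == "."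
    · cases cur with
      | none =>
        simp only [freeSpans, hf, if_true]
        exact ih (i+1) (some (i, 1)) acc
      | some sp =>
        obtain ⟨s, len⟩ := sp
        simp only [freeSpans, hf, if_true]
        exact ih (i+1) (some (s, len+1)) acc
    · cases cur with
      | none =>
        simp only [freeSpans, hf, Bool.false_eq_true, if_false]
        exact ih (i+1) none acc
      | some sp =>
        simp only [freeSpans, hf, Bool.false_eq_true, if_false, List.nil_append]
        rw [ih (i+1) none (acc ++ [sp]), ih (i+1) none [sp]]
        simp

-- a live span only grows: the next span emitted starts at s with length ≥ L
lemma freeSpans_grow (l : List String) : ∀ (i s L : Int),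
    ∃ L' tail, L ≤ L' ∧ freeSpans l i (some (s, L)) [] = (s, L') :: tail := by
  induction l with
  | nil => intro i s L; exact ⟨L, [], le_refl _, by simp [freeSpans]⟩
  | cons f rest ih =>
    intro i s L
    by_cases hf : f == "."
    · obtain ⟨L', tail, hL, heq⟩ := ih (i+1) s (L+1)
      exact ⟨L', tail, by omega, by simp [freeSpans, hf, heq]⟩
    · refine ⟨L, freeSpans rest (i+1) none [], le_refl _, ?_⟩
      simp only [freeSpans, hf, Bool.false_eq_true, if_false, List.nil_append]
      rw [freeSpans_acc]
      simp

lemma firstFit_skip (num : Int) (acc : List (Int × Int)) (h : ∀ p ∈ acc, p.2 < num) :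
    ∀ rest, firstFit num (acc ++ rest) = firstFit num rest := by
  induction acc with
  | nil => simp
  | cons p acc ih =>
    intro rest
    obtain ⟨s, len⟩ := p
    have hlt : len < num := h (s, len) (by simp)
    simp only [List.cons_append, firstFit, if_neg (by omega : ¬ num ≤ len)]
    exact ih (fun q hq => h q (by simp [hq])) rest

lemma goA_nonpos (num : Int) (hnum : num ≤ 0) (l : List (Int × String)) :
    ∀ free, goA num l free = [] := by
  induction l with
  | nil => intro free; simp [goA]
  | cons p rest ih =>
    intro free
    obtain ⟨i, f⟩ := p
    by_cases hf : f == "."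
    · have hc : ¬ (((free ++ [i]).length : Int) = num) := by
        simp only [List.length_append, List.length_cons, List.length_nil]; push_cast; omega
      simp only [goA, hf, if_true, if_neg hc]
      exact ih _
    · simp [goA, hf, ih]

lemma firstFit_nonpos (num : Int) (hnum : num ≤ 0) (spans : List (Int × Int)) :
    firstFit num spans = [] := by
  induction spans with
  | nil => simp [firstFit]
  | cons p rest ih =>
    obtain ⟨s, len⟩ := p
    by_cases h : num ≤ len
    · simp [firstFit, h, PySem.List.pyRange_one_eq_nil (by omega : s + num ≤ s)]
    · simp [firstFit, h, ih]

-- main invariant for num ≥ 1: A's pending run [s, …, i-1] corresponds to B's cur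
lemma main_inv (num : Int) (hnum : 1 ≤ num) (l : List String) :
    ∀ (s i : Int), s ≤ i → i - s < num →
      goA num (PySem.List.enumerate l i) (PySem.List.pyRange s i 1) =
        firstFit num (freeSpans l i (if s = i then none else some (s, i - s)) []) := by
  induction l with
  | nil =>
    intro s i hsi hlt
    by_cases hse : s = i
    · simp [PySem.List.enumerate_nil, goA, freeSpans, hse, firstFit]
    · simp [PySem.List.enumerate_nil, goA, freeSpans, hse, firstFit,
        if_neg (by omega : ¬ num ≤ i - s)]
  | cons f rest ih =>
    intro s i hsi hlt
    rw [PySem.List.enumerate_cons]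
    by_cases hf : f == "."
    · have hcat : PySem.List.pyRange s i 1 ++ [i] = PySem.List.pyRange s (i + 1) 1 :=
        (PySem.List.pyRange_one_succ_right hsi).symm
      have hlen : ((PySem.List.pyRange s (i + 1) 1).length : Int) = i - s + 1 := by
        rw [PySem.List.length_pyRange_one]; omega
      -- B's current run becomes (s, i - s + 1) whichever way the step goes
      have hcur : freeSpans (f :: rest) i (if s = i then none else some (s, i - s)) []
          = freeSpans rest (i + 1) (some (s, i - s + 1)) [] := by
        by_cases hse : s = i
        · subst hse
          rw [show s - s + 1 = (1 : Int) from by omega]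
          simp [freeSpans, hf]
        · simp only [if_neg hse, freeSpans, hf, if_true]
      by_cases hret : i - s + 1 = num
      · -- A returns here; B's current span ends with length ≥ num and is first wide enough
        have hAeq : goA num ((i, f) :: PySem.List.enumerate rest (i + 1)) (PySem.List.pyRange s i 1)
            = PySem.List.pyRange s (s + num) 1 := by
          simp only [goA, hf, if_true, hcat]
          rw [if_pos (by rw [hlen]; omega)]
          congr 1; omega
        rw [hAeq, hcur]
        obtain ⟨L', tail, hL, heq⟩ := freeSpans_grow rest (i+1) s (i - s + 1)
        rw [heq]
        simp [firstFit, if_pos (by omega : num ≤ L')]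
      · -- run continues, does not yet reach num
        have hAeq : goA num ((i, f) :: PySem.List.enumerate rest (i + 1)) (PySem.List.pyRange s i 1)
            = goA num (PySem.List.enumerate rest (i + 1)) (PySem.List.pyRange s (i + 1) 1) := by
          simp only [goA, hf, if_true, hcat]
          rw [if_neg (by rw [hlen]; omega)]
        rw [hAeq, ih s (i+1) (by omega) (by omega), if_neg (by omega : ¬ s = i + 1),
          show i + 1 - s = i - s + 1 from by omega, hcur]
    · -- occupied block: A resets, B closes the span (too short to be picked)
      have hAeq : goA num ((i, f) :: PySem.List.enumerate rest (i + 1)) (PySem.List.pyRange s i 1)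
          = goA num (PySem.List.enumerate rest (i + 1)) (PySem.List.pyRange (i+1) (i+1) 1) := by
        simp only [goA, hf, Bool.false_eq_true, if_false]
        rw [PySem.List.pyRange_one_eq_nil (le_refl (i+1))]
      rw [hAeq, ih (i+1) (i+1) (le_refl _) (by omega), if_pos rfl]
      by_cases hse : s = i
      · simp [freeSpans, hse, hf]
      · simp only [freeSpans, if_neg hse, hf, Bool.false_eq_true, if_false, List.nil_append]
        rw [freeSpans_acc rest (i+1) none [(s, i - s)],
          firstFit_skip num [(s, i - s)] (by intro p hp; simp at hp; subst hp; exact (by omega : i - s < num))]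

-- ===== VERDICT (by name: the statement is the Claim_ definition above) =====
theorem find_free_blocks_spec : Claim_equal_find_free_blocks := by
  intro num block_map _
  unfold Spec_find_free_blocks find_free_blocks find_free_blocks_alt
  by_cases hnum : 1 ≤ num
  · have h := main_inv num hnum block_map 0 0 (le_refl 0) (by omega)
    rw [PySem.List.pyRange_one_eq_nil (le_refl 0)] at h
    simpa using h
  · rw [goA_nonpos num (by omega) _ [], firstFit_nonpos num (by omega)]
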